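-- pv_equiv track=rewrite | github.com/tinker495/PuXle | puxle/pddls/fusion.py | _build_types_lines
-- ===== SOURCE A (Python) =====
-- from collections import defaultdict
-- from typing import Dict, Iterable, List, Optional, Sequence, Tuple
--
-- def _build_types_lines(type_parents: Dict[str, Optional[str]]) -> List[str]:
--     if not type_parents:
--         return []
--     parent_to_children: Dict[Optional[str], List[str]] = defaultdict(list)
--     all_types = set(type_parents.keys()) | {p for p in type_parents.values() if p is not None}
--     for typ in all_types:
--         parent_to_children.setdefault(type_parents.get(typ), [])
--     for typ, parent in type_parents.items():
--         parent_to_children[parent].append(typ)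
--     lines = ["  (:types"]
--     for parent, children in sorted(parent_to_children.items(), key=lambda item: (item[0] is not None, item[0] or "")):
--         if not children:
--             continue
--         child_list = " ".join(sorted(set(children)))
--         if parent:
--             lines.append(f"    {child_list} - {parent}")
--         else:
--             lines.append(f"    {child_list}")
--     lines.append("  )")
--     return lines
-- ===== SOURCE B (Python) =====
-- from typing import Dict, List, Optional
--
--
-- def _build_types_lines(type_parents: Dict[str, Optional[str]]) -> List[str]:
--     if not type_parents:
--         return []
--     parents = sorted({p for p in type_parents.values()},
--                      key=lambda p: (p is not None, p or ""))
--     lines = ["  (:types"]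
--     for p in parents:
--         kids = " ".join(sorted({t for t, q in type_parents.items() if q == p}))
--         lines.append(f"    {kids} - {p}" if p else f"    {kids}")
--     lines.append("  )")
--     return lines
-- ===== Notes on version B (the rewrite author's own statement) =====
-- stated objective: simpler
-- what changed: A seeds a defaultdict over set(keys)|set(parents) (a dead pass), appends every type into a parent->children dict, then sorts the dict items; B drops the dict and the dead pass entirely: it sorts the distinct parent values once and emits each line by filtering the items for that parent.
import Mathlib
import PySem

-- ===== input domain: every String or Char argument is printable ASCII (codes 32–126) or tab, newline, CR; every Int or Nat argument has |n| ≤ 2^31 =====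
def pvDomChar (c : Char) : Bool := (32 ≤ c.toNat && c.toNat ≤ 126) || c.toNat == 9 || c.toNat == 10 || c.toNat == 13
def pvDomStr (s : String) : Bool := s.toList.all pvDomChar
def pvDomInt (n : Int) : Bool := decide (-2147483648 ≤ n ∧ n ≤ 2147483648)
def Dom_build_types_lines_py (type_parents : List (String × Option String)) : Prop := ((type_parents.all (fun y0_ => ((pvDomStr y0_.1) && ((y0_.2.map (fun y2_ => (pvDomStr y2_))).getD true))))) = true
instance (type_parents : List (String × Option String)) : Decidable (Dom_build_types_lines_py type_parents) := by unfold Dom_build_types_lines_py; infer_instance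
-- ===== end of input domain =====

-- B replaces A's dict-of-lists grouping (plus A's dead seeding pass over set(keys)|set(parents))
-- by sorting the distinct parents once and collecting each parent's children with a direct
-- filter per parent: shorter and plainer (objective: simpler, not faster).

-- ===== PORT A =====
-- Transliteration of A, its locals as named helpers. Python iterates the first (dead,
-- value-seeding) loop over the SET all_types in hash order; the port uses the Set's list
-- order — exact, because that loop only seeds empty child lists and the dict is consumed
-- through a sort whose key is injective on the dict's keys, so the result does not depend
-- on the set's iteration order. The Python tuple sort key (parent is not None, parent or "")
-- is ported via PySem.List.sorted2; str-vs-str '<' is compared on .toList (code points).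

-- parent_to_children after the setdefault seeding loop over all_types
def pyA_seed (type_parents : List (String × Option String)) :
    PySem.Dict (Option String) (List String) :=
  (PySem.Set.union (PySem.Set.ofList (type_parents.map Prod.fst))
      (PySem.Set.ofList (type_parents.filterMap Prod.snd))).foldl
    (fun d typ =>
      d.setdefault (((type_parents.find? (fun kv => kv.1 == typ)).map Prod.snd).getD none) [])
    PySem.Dict.empty

-- parent_to_children after the appending loop over type_parents.items()
def pyA_groups (type_parents : List (String × Option String)) :
    PySem.Dict (Option String) (List String) :=
  type_parents.foldl (fun d kv => d.modify kv.2 [] (· ++ [kv.1])) (pyA_seed type_parents)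

-- one body line from a (parent, children) item: '    {child_list} - {parent}' / '    {child_list}'
def pyA_line (it : Option String × List String) : String :=
  match it.1 with
  | some p =>
      if p = "" then "    " ++ PySem.Str.join " " (PySem.List.sorted (PySem.List.dedup it.2) (fun s => s.toList))
      else "    " ++ PySem.Str.join " " (PySem.List.sorted (PySem.List.dedup it.2) (fun s => s.toList)) ++ " - " ++ p
  | none => "    " ++ PySem.Str.join " " (PySem.List.sorted (PySem.List.dedup it.2) (fun s => s.toList))

def build_types_lines_py (type_parents : List (String × Option String)) : List String :=
  if type_parents = [] then []
  else
    (PySem.List.sorted2 (pyA_groups type_parents).items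
        (fun it => it.1.isSome) (fun it => (it.1.getD "").toList)).foldl
      (fun lines it => if it.2 = [] then lines else lines ++ [pyA_line it])
      ["  (:types"]
    ++ ["  )"]

-- ===== PORT B =====
-- one body line for parent p: children = sorted set of first components whose parent is p
def pyB_line (type_parents : List (String × Option String)) (p : Option String) : String :=
  match p with
  | some s =>
      if s = "" then "    " ++ PySem.Str.join " " (PySem.List.sorted
          (PySem.Set.ofList ((type_parents.filter (fun kv => kv.2 == p)).map Prod.fst)) (fun s => s.toList))
      else "    " ++ PySem.Str.join " " (PySem.List.sorted
          (PySem.Set.ofList ((type_parents.filter (fun kv => kv.2 == p)).map Prod.fst)) (fun s => s.toList)) ++ " - " ++ s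
  | none => "    " ++ PySem.Str.join " " (PySem.List.sorted
      (PySem.Set.ofList ((type_parents.filter (fun kv => kv.2 == p)).map Prod.fst)) (fun s => s.toList))

def build_types_lines_py_alt (type_parents : List (String × Option String)) : List String :=
  if type_parents = [] then []
  else
    "  (:types" ::
      (PySem.List.sorted2 (PySem.Set.ofList (type_parents.map Prod.snd))
          (fun p => p.isSome) (fun p => (p.getD "").toList)).map (pyB_line type_parents)
      ++ ["  )"]

-- ===== PRECONDITION & SPEC =====
def Spec_build_types_lines_py (type_parents : List (String × Option String)) (out : List String) : Prop := out = build_types_lines_py_alt type_parents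
instance (type_parents : List (String × Option String)) (out : List String) : Decidable (Spec_build_types_lines_py type_parents out) := by unfold Spec_build_types_lines_py; infer_instance

-- ===== CLAIM (what is proved, stated in full; the proofs are below) =====
def Claim_equal_build_types_lines_py : Prop := ∀ (type_parents : List (String × Option String)), Dom_build_types_lines_py type_parents → Spec_build_types_lines_py type_parents (build_types_lines_py type_parents)

-- ===== LEMMAS AND PROOFS =====

-- the (injective) linear sort key Python's tuple (parent is not None, parent or "") realises
def pvKey (p : Option String) : Bool ×ₗ List Char := toLex (p.isSome, (p.getD "").toList)

-- children of parent q, in input order (what both programs group)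
def kidsOf (type_parents : List (String × Option String)) (q : Option String) : List String :=
  (type_parents.filter (fun kv => kv.2 == q)).map Prod.fst

theorem pvKey_inj : Function.Injective pvKey := by
  intro a b h
  simp only [pvKey, toLex_inj, Prod.mk.injEq] at h
  cases a <;> cases b <;> simp_all
  exact String.toList_inj.mp h

theorem sorted2_eq_sorted_pvKey {α : Type} (xs : List α) (f : α → Option String) :
    PySem.List.sorted2 xs (fun a => (f a).isSome) (fun a => ((f a).getD "").toList) false
      = PySem.List.sorted xs (fun a => pvKey (f a)) false := by
  have hb : (fun a b => decide ((f a).isSome < (f b).isSome) ||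
        (!decide ((f b).isSome < (f a).isSome) &&
          decide (((f a).getD "").toList < ((f b).getD "").toList)))
      = (fun a b => decide (pvKey (f a) < pvKey (f b))) := by
    funext a b
    cases hA : (f a).isSome <;> cases hB : (f b).isSome <;>
      simp [pvKey, hA, hB, Prod.Lex.toLex_lt_toLex]
  simp only [PySem.List.sorted2, PySem.List.sorted, Bool.false_eq_true, if_false]
  rw [hb]

theorem seed_getD (l : List String) (g : String → Option String)
    (d : PySem.Dict (Option String) (List String)) (h : ∀ q, d.getD q [] = [])
    (q : Option String) :
    (l.foldl (fun d typ => d.setdefault (g typ) []) d).getD q [] = [] := by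
  induction l generalizing d with
  | nil => exact h q
  | cons x xs ih =>
    simp only [List.foldl_cons]
    apply ih
    intro q'
    by_cases hc : d.contains (g x) = true
    · rw [PySem.Dict.setdefault_of_contains _ _ hc]; exact h q'
    · rw [PySem.Dict.setdefault_of_not_contains _ _ (by simpa using hc)]
      rw [PySem.Dict.getD_insert]
      split_ifs with he
      · rfl
      · exact h q'

theorem seed_nodup (l : List String) (g : String → Option String)
    (d : PySem.Dict (Option String) (List String)) (h : d.keys.Nodup) :
    (l.foldl (fun d typ => d.setdefault (g typ) []) d).keys.Nodup := by
  induction l generalizing d with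
  | nil => exact h
  | cons x xs ih =>
    simp only [List.foldl_cons]
    apply ih
    by_cases hc : d.contains (g x) = true
    · rw [PySem.Dict.setdefault_of_contains _ _ hc]; exact h
    · rw [PySem.Dict.setdefault_of_not_contains _ _ (by simpa using hc)]
      exact PySem.Dict.nodup_keys_insert _ _ _ h

theorem sorted_pairwise_lt_of_nodup (xs : List (Option String)) (h : xs.Nodup) :
    (PySem.List.sorted xs pvKey false).Pairwise (fun a b => pvKey a < pvKey b) := by
  have hle := PySem.List.sorted_pairwise xs pvKey
  have hnd : (PySem.List.sorted xs pvKey false).Nodup :=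
    (PySem.List.sorted_perm xs pvKey false).symm.nodup h
  exact (hle.and hnd).imp (fun {a b} hab =>
    lt_of_le_of_ne hab.1 (fun hk => hab.2 (pvKey_inj hk)))

theorem kids_ne_nil_iff (tp : List (String × Option String)) (q : Option String) :
    kidsOf tp q ≠ [] ↔ q ∈ tp.map Prod.snd := by
  simp [kidsOf, List.filter_eq_nil_iff, List.mem_map]

theorem pyA_seed_getD (tp : List (String × Option String)) (q : Option String) :
    (pyA_seed tp).getD q [] = [] := by
  unfold pyA_seed
  exact seed_getD _ _ _ (fun q' => by simp [PySem.Dict.getD_empty]) q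

theorem pyA_seed_nodup (tp : List (String × Option String)) : (pyA_seed tp).keys.Nodup := by
  unfold pyA_seed
  exact seed_nodup _ _ _ (by simp [PySem.Dict.keys_empty])

theorem groups_getD (tp : List (String × Option String)) (q : Option String) :
    (pyA_groups tp).getD q [] = kidsOf tp q := by
  unfold pyA_groups
  have hfold : tp.foldl (fun d kv => d.modify kv.2 [] (· ++ [kv.1])) (pyA_seed tp)
      = (tp.map Prod.swap).foldl (fun d p => d.modify p.1 [] (· ++ [p.2])) (pyA_seed tp) := by
    rw [List.foldl_map]; simp
  rw [hfold, PySem.Dict.getD_foldl_modify_append, pyA_seed_getD]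
  simp [kidsOf, List.filter_map, Function.comp_def]

theorem groups_nodup (tp : List (String × Option String)) : (pyA_groups tp).keys.Nodup := by
  unfold pyA_groups
  exact PySem.Dict.nodup_keys_foldl_modify_key tp Prod.snd [] (fun _ kv => (· ++ [kv.1])) _
    (pyA_seed_nodup tp)

theorem groups_mem_keys (tp : List (String × Option String)) (q : Option String)
    (h : q ∈ tp.map Prod.snd) : q ∈ (pyA_groups tp).keys := by
  unfold pyA_groups
  rw [PySem.Dict.keys_foldl_modify_key tp Prod.snd [] (fun _ kv => (· ++ [kv.1]))]
  exact (PySem.Set.mem_update _ _ _).mpr (Or.inr h)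

theorem sorted2_eq_sorted_pvKey_id (xs : List (Option String)) :
    PySem.List.sorted2 xs (fun p => p.isSome) (fun p => (p.getD "").toList) false
      = PySem.List.sorted xs pvKey false :=
  sorted2_eq_sorted_pvKey xs (fun p => p)

-- ===== VERDICT (by name: the statement is the Claim_ definition above) =====
theorem build_types_lines_py_spec : Claim_equal_build_types_lines_py := by
  intro tp _
  unfold Spec_build_types_lines_py build_types_lines_py build_types_lines_py_alt
  by_cases htp : tp = []
  · simp [htp]
  · rw [if_neg htp, if_neg htp,
      sorted2_eq_sorted_pvKey ((pyA_groups tp).items) Prod.fst, sorted2_eq_sorted_pvKey_id]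
    have hitems : (pyA_groups tp).items
        = (pyA_groups tp).keys.map (fun q => (q, kidsOf tp q)) := by
      rw [PySem.Dict.items_eq_map_keys _ (groups_nodup tp) []]
      exact List.map_congr_left (fun q _ => by rw [groups_getD])
    have hs : PySem.List.sorted (pyA_groups tp).items (fun it => pvKey it.1) false
        = (PySem.List.sorted (pyA_groups tp).keys pvKey false).map (fun q => (q, kidsOf tp q)) := by
      apply PySem.List.sorted_eq_of_perm_of_pairwise_lt
      · rw [hitems]; exact (PySem.List.sorted_perm _ pvKey false).map _
      · rw [List.pairwise_map]
        exact sorted_pairwise_lt_of_nodup _ (groups_nodup tp)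
    rw [hs]
    have hflip : (fun (lines : List String) (it : Option String × List String) =>
          if it.2 = [] then lines else lines ++ [pyA_line it])
        = (fun lines it => if (!it.2.isEmpty) = true then lines ++ [pyA_line it] else lines) := by
      funext lines it
      rcases it with ⟨p, cs⟩; cases cs <;> simp
    rw [hflip, PySem.List.foldl_append_if, List.filter_map, List.map_map]
    have hfilt : List.filter ((fun it => !it.2.isEmpty) ∘ (fun q => (q, kidsOf tp q)))
          (PySem.List.sorted (pyA_groups tp).keys pvKey false)
        = PySem.List.sorted (PySem.Set.ofList (tp.map Prod.snd)) pvKey false := by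
      symm
      apply PySem.List.sorted_eq_of_perm_of_pairwise_lt
      · apply (List.perm_ext_iff_of_nodup
          (((PySem.List.sorted_perm _ pvKey false).symm.nodup (groups_nodup tp)).filter _)
          (PySem.Set.nodup_ofList _)).mpr
        intro q
        simp only [List.mem_filter, PySem.List.mem_sorted, PySem.Set.mem_ofList,
          Function.comp_apply, Bool.not_eq_eq_eq_not]
        constructor
        · rintro ⟨-, hne⟩
          exact (kids_ne_nil_iff tp q).mp (by simpa using hne)
        · intro hq
          refine ⟨groups_mem_keys tp q hq, ?_⟩
          simpa using (kids_ne_nil_iff tp q).mpr hq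
      · exact (sorted_pairwise_lt_of_nodup _ (groups_nodup tp)).filter _
    rw [hfilt]
    have hline : pyA_line ∘ (fun q => (q, kidsOf tp q)) = pyB_line tp := by
      funext q
      cases q <;> simp [pyA_line, pyB_line, kidsOf]
    rw [hline]
    rfl
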